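-- pv_equiv track=rewrite | github.com/Cartoonized/tvorba_rozvrhu_hodin | tvorba_seznamu_z_nactenych_dat.py | Vytvor_PPPDO
-- ===== SOURCE A (Python) =====
-- def Vytvor_Matici(radky, sloupce):
--     seznam = []
--     for radek in range(len(radky)):
--         row = []
--         for sloupec in range(len(sloupce)):
--             row.append(0)
--         seznam.append(row)
--     return seznam
--
-- def Vytvor_PPPDO(seznam: list[list[str]], obory: list[str], predmety: list[str]) -> list[list[int]]:  # dříve pocet_potrebnych_prednasek_dle_trid_zaku
--     # index řádku = index oboru v seznamu 'obory'
--     # index sloupce = index předmětu v seznamu 'predmety'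
--     # hodnoty = počet přednášek u tohoto oboru(řádek) tohoto předmětu(sloupec)
--     # potřeba -> obory, předměty, počet_přednášek
--     """
--     vem obor(řádek) a pro každý předmět(sloupec), zapisuj 0 (není u tohoto oboru) nebo číslo udávájící počet
--     požadovaných oborem přednášek tohot předmětu
--     :param seznam: seznam_obor_predmet (data z csv)
--     :param obory: seznam oborů
--     :param predmety: seznam předmětů
--     :return: pokud je ve sloupci více nenulových čísel -> pro všechny řádky(obory) je tento sloupec(předmět) společný -> (2d pole)
--     """
--
--     # předvytvoření tabulky
--     pppdtz = Vytvor_Matici(obory, predmety)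
--
--     """
--     najdu vybraný obor spolu s vybraným předmětem v seznamu a zapíšu hodnotu
--     tím se zapíší hodnoty u předmětů, které k oboru patří
--     poté se do nevyplněných míst zapíše 0
--     """
--     for obor in range(len(obory)):
--         for predmet in range(len(predmety)):
--             for radek in range(len(seznam)):
--                 if obory[obor] == seznam[radek][0]:
--                     if predmety[predmet] == seznam[radek][1]:
--                         pppdtz[obor][predmet] = int(seznam[radek][2])
--     return pppdtz
-- ===== SOURCE B (Python) =====
-- def Vytvor_PPPDO(seznam: list[list[str]], obory: list[str], predmety: list[str]) -> list[list[int]]: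
--     # Single pass over the records: for each record find every matching row/column
--     # index (duplicates included) and write the count; later records overwrite earlier
--     # ones, so last record wins exactly as in the triple-loop version.
--     vysledek = [[0] * len(predmety) for _ in obory]
--     if not obory or not predmety:
--         return vysledek
--     for rec in seznam:
--         ii = [i for i, o in enumerate(obory) if o == rec[0]]
--         if not ii:
--             continue
--         jj = [j for j, p in enumerate(predmety) if p == rec[1]]
--         if not jj:
--             continue
--         v = int(rec[2])
--         for i in ii:
--             for j in jj:
--                 vysledek[i][j] = v
--     return vysledek
-- ===== Notes on version B (the rewrite author's own statement) =====
-- stated objective: faster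
-- what changed: Inverts the loop nest: instead of scanning all records for every (obor, predmet) cell, B makes a single pass over the records, computes the matching row and column index lists per record and writes every matched cell, with later records overwriting earlier ones exactly as in A.
import Mathlib
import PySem

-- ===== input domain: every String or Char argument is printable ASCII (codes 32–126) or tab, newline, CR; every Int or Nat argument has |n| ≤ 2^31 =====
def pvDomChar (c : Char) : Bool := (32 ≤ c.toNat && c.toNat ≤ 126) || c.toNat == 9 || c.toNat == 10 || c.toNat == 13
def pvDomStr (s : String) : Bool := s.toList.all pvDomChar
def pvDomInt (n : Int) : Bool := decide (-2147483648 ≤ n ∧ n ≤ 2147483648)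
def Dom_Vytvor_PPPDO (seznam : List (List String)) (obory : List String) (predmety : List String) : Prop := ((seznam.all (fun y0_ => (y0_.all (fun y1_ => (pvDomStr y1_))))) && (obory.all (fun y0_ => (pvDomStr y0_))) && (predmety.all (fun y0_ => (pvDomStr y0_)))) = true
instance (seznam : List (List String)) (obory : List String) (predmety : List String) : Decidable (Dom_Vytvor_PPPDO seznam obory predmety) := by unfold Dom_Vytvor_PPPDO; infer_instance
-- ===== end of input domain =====

-- B inverts A's loop nest: one pass over the records instead of a scan of all records
-- for every (obor, predmet) cell; return values agree on all inputs where A returns.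

-- `m[i][j] = v` on a list-of-lists matrix (shared helper of both ports).
def pvSet2 (m : List (List Int)) (i j : Nat) (v : Int) : List (List Int) :=
  m.set i ((m.getD i []).set j v)

-- ===== PORT A =====
def Vytvor_Matici (radky sloupce : List String) : List (List Int) :=
  (List.range radky.length).foldl
    (fun seznam _ =>
      seznam ++ [(List.range sloupce.length).foldl (fun row _ => row ++ [(0 : Int)]) []])
    []

def Vytvor_PPPDO (seznam : List (List String)) (obory : List String) (predmety : List String) : List (List Int) :=
  (List.range obory.length).foldl
    (fun m obor =>
      (List.range predmety.length).foldl
        (fun m predmet =>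
          (List.range seznam.length).foldl
            (fun m radek =>
              if obory.getD obor "" == (seznam.getD radek []).getD 0 "" then
                if predmety.getD predmet "" == (seznam.getD radek []).getD 1 "" then
                  pvSet2 m obor predmet ((PySem.Int.ofStr? ((seznam.getD radek []).getD 2 "")).getD 0)
                else m
              else m)
            m)
        m)
    (Vytvor_Matici obory predmety)

-- ===== PORT B =====
def Vytvor_PPPDO_alt (seznam : List (List String)) (obory : List String) (predmety : List String) : List (List Int) :=
  let vysledek := obory.map (fun _ => List.replicate predmety.length (0 : Int))
  if obory = [] ∨ predmety = [] then vysledek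
  else
    seznam.foldl
      (fun m r =>
        let ii := (obory.zipIdx.filter (fun oi => oi.1 == r.getD 0 "")).map (fun oi => oi.2)
        if ii = [] then m
        else
          let jj := (predmety.zipIdx.filter (fun pj => pj.1 == r.getD 1 "")).map (fun pj => pj.2)
          if jj = [] then m
          else
            let v := (PySem.Int.ofStr? (r.getD 2 "")).getD 0
            ii.foldl (fun m i => jj.foldl (fun m j => pvSet2 m i j v) m) m)
      vysledek

-- ===== PRECONDITION & SPEC =====
-- Pre_ excludes exactly the inputs where the Python A raises: with nonempty obory and
-- predmety, a record shorter than what A indexes on it (1, 2 or 3 fields depending on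
-- how far its prefix matches) raises IndexError, and an unparseable count field on a
-- fully matching record raises ValueError.
def Pre_Vytvor_PPPDO (seznam : List (List String)) (obory : List String) (predmety : List String) : Prop :=
  obory ≠ [] → predmety ≠ [] → ∀ r ∈ seznam,
    1 ≤ r.length ∧ (r.getD 0 "" ∈ obory →
      2 ≤ r.length ∧ (r.getD 1 "" ∈ predmety →
        3 ≤ r.length ∧ (PySem.Int.ofStr? (r.getD 2 "")).isSome))
instance (seznam : List (List String)) (obory : List String) (predmety : List String) : Decidable (Pre_Vytvor_PPPDO seznam obory predmety) := by unfold Pre_Vytvor_PPPDO; infer_instance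

def pvWitness_Vytvor_PPPDO : List (List String) × List String × List String :=
  ([["a", "x", "2"], ["b", "y", "3"]], ["a", "b"], ["x", "y"])

def Spec_Vytvor_PPPDO (seznam : List (List String)) (obory : List String) (predmety : List String) (out : List (List Int)) : Prop := out = Vytvor_PPPDO_alt seznam obory predmety
instance (seznam : List (List String)) (obory : List String) (predmety : List String) (out : List (List Int)) : Decidable (Spec_Vytvor_PPPDO seznam obory predmety out) := by unfold Spec_Vytvor_PPPDO; infer_instance

-- ===== CLAIM (what is proved, stated in full; the proofs are below) =====
def Claim_equal_Vytvor_PPPDO : Prop := ∀ (seznam : List (List String)) (obory : List String) (predmety : List String), Dom_Vytvor_PPPDO seznam obory predmety → Pre_Vytvor_PPPDO seznam obory predmety → Spec_Vytvor_PPPDO seznam obory predmety (Vytvor_PPPDO seznam obory predmety)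

-- ===== LEMMAS AND PROOFS =====

-- proof-side vocabulary
def pvGet2 (m : List (List Int)) (i j : Nat) : Int := (m.getD i []).getD j 0

def pvMatch (o p : String) (r : List String) : Bool :=
  (o == r.getD 0 "") && (p == r.getD 1 "")

def pvVal (r : List String) : Int := (PySem.Int.ofStr? (r.getD 2 "")).getD 0

-- value of cell (o, p) after processing all records of s, starting from x
def pvCellD (s : List (List String)) (o p : String) (x : Int) : Int :=
  match (s.filter (pvMatch o p)).getLast? with
  | some r => pvVal r
  | none => x

def pvShape (R C : Nat) (m : List (List Int)) : Prop :=
  m.length = R ∧ ∀ row ∈ m, row.length = C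

theorem pvGetD_mem {m : List (List Int)} {i : Nat} (hi : i < m.length) :
    m.getD i [] = m[i] ∧ m[i] ∈ m := by
  constructor
  · simp [List.getD, List.getElem?_eq_getElem hi]
  · exact List.getElem_mem hi

theorem pvShape_set2 {R C : Nat} {m : List (List Int)} (h : pvShape R C m)
    (i j : Nat) (v : Int) : pvShape R C (pvSet2 m i j v) := by
  by_cases hi : i < m.length
  · obtain ⟨hl, hrow⟩ := h
    refine ⟨by simpa [pvSet2] using hl, ?_⟩
    intro row hr
    rcases List.mem_or_eq_of_mem_set hr with hmem | he
    · exact hrow row hmem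
    · subst he
      rw [List.length_set, (pvGetD_mem hi).1]
      exact hrow _ (pvGetD_mem hi).2
  · unfold pvSet2
    rw [List.set_eq_of_length_le (Nat.le_of_not_lt hi)]
    exact h

theorem pvGet2_set2_self {m : List (List Int)} {i j : Nat} (hi : i < m.length)
    (hj : j < (m.getD i []).length) (v : Int) : pvGet2 (pvSet2 m i j v) i j = v := by
  unfold pvGet2 pvSet2
  simp only [List.getD] at *
  rw [List.getElem?_set_self hi]
  simp only [Option.getD_some]
  rw [List.getElem?_set_self hj]
  rfl

theorem pvGet2_set2_ne {m : List (List Int)} {i j i' j' : Nat}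
    (h : i' ≠ i ∨ j' ≠ j) (v : Int) : pvGet2 (pvSet2 m i j v) i' j' = pvGet2 m i' j' := by
  unfold pvGet2 pvSet2
  by_cases hii : i' = i
  · subst hii
    rcases h with hi | hj
    · exact absurd rfl hi
    · by_cases hlt : i' < m.length
      · simp only [List.getD]
        rw [List.getElem?_set_self hlt]
        simp only [Option.getD_some]
        rw [List.getElem?_set_ne (fun hh => hj hh.symm)]
      · rw [List.set_eq_of_length_le (Nat.le_of_not_lt hlt)]
  · simp only [List.getD]
    rw [List.getElem?_set_ne (fun hh => hii hh.symm)]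

theorem pvSet2_set2 (m : List (List Int)) (i j : Nat) (v v' : Int) :
    pvSet2 (pvSet2 m i j v) i j v' = pvSet2 m i j v' := by
  by_cases hi : i < m.length
  · unfold pvSet2
    simp only [List.getD]
    rw [List.getElem?_set_self hi]
    simp only [Option.getD_some]
    rw [List.set_set, List.set_set]
  · unfold pvSet2
    rw [List.set_eq_of_length_le (Nat.le_of_not_lt hi),
        List.set_eq_of_length_le (Nat.le_of_not_lt hi)]

theorem pvShape_foldl {α : Type} {R C : Nat} (f : List (List Int) → α → List (List Int))
    (hf : ∀ m x, pvShape R C m → pvShape R C (f m x)) :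
    ∀ (xs : List α) (m : List (List Int)), pvShape R C m → pvShape R C (xs.foldl f m) := by
  intro xs
  induction xs with
  | nil => intro m hm; simpa using hm
  | cons x xs ih => intro m hm; exact ih _ (hf m x hm)

theorem pvGet2_zero (R C : Nat) (i j : Nat) :
    pvGet2 (List.replicate R (List.replicate C (0 : Int))) i j = 0 := by
  unfold pvGet2
  by_cases hi : i < R
  · rw [show (List.replicate R (List.replicate C (0 : Int))).getD i [] = List.replicate C (0 : Int) by
      simp [List.getD, hi]]
    by_cases hj : j < C <;> simp [List.getD, hj]
  · rw [show (List.replicate R (List.replicate C (0 : Int))).getD i [] = [] by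
      simp [List.getD, hi]]
    simp [List.getD]

theorem pvShape_zero (R C : Nat) : pvShape R C (List.replicate R (List.replicate C (0 : Int))) := by
  exact ⟨by simp, by intro row h; simp [List.eq_of_mem_replicate h]⟩

theorem pvFoldl_append_const {α : Type} (x : α) :
    ∀ (n : Nat) (acc : List α), (List.range n).foldl (fun l _ => l ++ [x]) acc = acc ++ List.replicate n x := by
  intro n
  induction n with
  | zero => simp
  | succ k ih =>
    intro acc
    rw [List.range_succ, List.foldl_append]
    simp [ih, List.replicate_succ']

theorem pvZero_A (obory predmety : List String) :
    Vytvor_Matici obory predmety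
      = List.replicate obory.length (List.replicate predmety.length (0 : Int)) := by
  unfold Vytvor_Matici
  rw [show (fun (seznam : List (List Int)) (_ : Nat) =>
        seznam ++ [(List.range predmety.length).foldl (fun row _ => row ++ [(0 : Int)]) []])
      = fun seznam _ => seznam ++ [List.replicate predmety.length (0 : Int)] by
    funext seznam k
    rw [pvFoldl_append_const]
    simp]
  rw [pvFoldl_append_const]
  simp

theorem pvZero_B (obory predmety : List String) :
    obory.map (fun _ => List.replicate predmety.length (0 : Int))
      = List.replicate obory.length (List.replicate predmety.length (0 : Int)) := by
  exact List.map_const'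

theorem pvMatrix_ext {R C : Nat} {m m' : List (List Int)} (hm : pvShape R C m)
    (hm' : pvShape R C m') (h : ∀ i < R, ∀ j < C, pvGet2 m i j = pvGet2 m' i j) :
    m = m' := by
  apply List.ext_getElem (by rw [hm.1, hm'.1])
  intro i h1 h2
  apply List.ext_getElem (by rw [hm.2 _ (List.getElem_mem h1), hm'.2 _ (List.getElem_mem h2)])
  intro j hj1 hj2
  have hiR : i < R := hm.1 ▸ h1
  have hjC : j < C := (hm.2 _ (List.getElem_mem h1)) ▸ hj1
  have := h i hiR j hjC
  unfold pvGet2 at this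
  rw [(pvGetD_mem h1).1, (pvGetD_mem h2).1] at this
  rwa [List.getD_eq_getElem _ _ hj1, List.getD_eq_getElem _ _ hj2] at this

theorem pvFoldl_range_getD {α β : Type} (f : β → α → β) (d : α) :
    ∀ (xs : List α) (init : β),
      (List.range xs.length).foldl (fun m k => f m (xs.getD k d)) init = xs.foldl f init := by
  intro xs
  induction xs with
  | nil => simp
  | cons x xs ih =>
    intro init
    rw [List.length_cons, List.range_succ_eq_map, List.foldl_cons, List.foldl_map]
    simpa using ih (f init x)

-- ===== A-side characterisation =====

-- per-cell effect of A's innermost radek-loop at cell (i, j)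
def pvCellApply (s : List (List String)) (o p : String) (i j : Nat)
    (m : List (List Int)) : List (List Int) :=
  match (s.filter (pvMatch o p)).getLast? with
  | some r => pvSet2 m i j (pvVal r)
  | none => m

theorem pvFoldl_set2_last (i j : Nat) :
    ∀ (l : List (List String)) (m : List (List Int)),
      l.foldl (fun m r => pvSet2 m i j (pvVal r)) m
        = match l.getLast? with
          | some r => pvSet2 m i j (pvVal r)
          | none => m := by
  intro l
  induction l with
  | nil => intro m; rfl
  | cons r l ih =>
    intro m
    rw [List.foldl_cons, ih]
    rcases hl : l.getLast? with - | r'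
    · rw [List.getLast?_eq_none_iff.1 hl]
      simp
    · rcases l with - | ⟨a, l'⟩
      · simp at hl
      · rw [List.getLast?_cons_cons, hl]
        simp [pvSet2_set2]

theorem pvA_inner (o p : String) (i j : Nat) :
    ∀ (s : List (List String)) (m : List (List Int)),
      s.foldl
        (fun m r =>
          if o == r.getD 0 "" then
            if p == r.getD 1 "" then pvSet2 m i j (pvVal r) else m
          else m)
        m = pvCellApply s o p i j m := by
  intro s m
  rw [show (fun (m : List (List Int)) (r : List String) =>
        if o == r.getD 0 "" then
          if p == r.getD 1 "" then pvSet2 m i j (pvVal r) else m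
        else m)
      = fun m r => if pvMatch o p r then pvSet2 m i j (pvVal r) else m by
    funext m r
    unfold pvMatch
    rcases h0 : (o == r.getD 0 "") <;> rcases h1 : (p == r.getD 1 "") <;> simp]
  rw [PySem.List.foldl_if_eq_foldl_filter (pvMatch o p) (fun m r => pvSet2 m i j (pvVal r))]
  rw [pvFoldl_set2_last]
  rfl

theorem pvShape_cellApply {R C : Nat} (s : List (List String)) (o p : String) (i j : Nat)
    {m : List (List Int)} (h : pvShape R C m) : pvShape R C (pvCellApply s o p i j m) := by
  unfold pvCellApply
  rcases (s.filter (pvMatch o p)).getLast? with - | r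
  · exact h
  · exact pvShape_set2 h i j (pvVal r)

theorem pvGet2_cellApply_self {R C : Nat} (s : List (List String)) (o p : String)
    {i j : Nat} {m : List (List Int)} (hm : pvShape R C m) (hi : i < R) (hj : j < C) :
    pvGet2 (pvCellApply s o p i j m) i j = pvCellD s o p (pvGet2 m i j) := by
  unfold pvCellApply pvCellD
  rcases (s.filter (pvMatch o p)).getLast? with - | r
  · rfl
  · have hil : i < m.length := hm.1 ▸ hi
    have hjl : j < (m.getD i []).length := by
      rw [(pvGetD_mem hil).1, hm.2 _ (pvGetD_mem hil).2]; exact hj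
    exact pvGet2_set2_self hil hjl (pvVal r)

theorem pvGet2_cellApply_ne (s : List (List String)) (o p : String)
    {i j i' j' : Nat} (h : i' ≠ i ∨ j' ≠ j) (m : List (List Int)) :
    pvGet2 (pvCellApply s o p i j m) i' j' = pvGet2 m i' j' := by
  unfold pvCellApply
  rcases (s.filter (pvMatch o p)).getLast? with - | r
  · rfl
  · exact pvGet2_set2_ne h (pvVal r)

theorem pvA_row (s : List (List String)) (obory predmety : List String) (i i0 j0 : Nat) :
    ∀ (C : Nat) (m : List (List Int)), pvShape obory.length predmety.length m →
      i < obory.length → j0 < predmety.length → C ≤ predmety.length →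
      pvGet2
        ((List.range C).foldl
          (fun m j => pvCellApply s (obory.getD i "") (predmety.getD j "") i j m) m) i0 j0
        = if i = i0 ∧ j0 < C then
            pvCellD s (obory.getD i0 "") (predmety.getD j0 "") (pvGet2 m i0 j0)
          else pvGet2 m i0 j0 := by
  intro C
  induction C with
  | zero => intro m hm hi hj0 hC; simp
  | succ C ih =>
    intro m hm hi hj0 hC
    rw [List.range_succ, List.foldl_append, List.foldl_cons, List.foldl_nil]
    have hX : pvShape obory.length predmety.length
        ((List.range C).foldl
          (fun m j => pvCellApply s (obory.getD i "") (predmety.getD j "") i j m) m) :=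
      pvShape_foldl _ (fun m j hm => pvShape_cellApply s _ _ i j hm) _ m hm
    by_cases hcell : i = i0 ∧ j0 = C
    · obtain ⟨hii, hjj⟩ := hcell
      subst hii; subst hjj
      rw [pvGet2_cellApply_self s _ _ hX hi hj0]
      rw [ih m hm hi hj0 (Nat.le_of_succ_le hC)]
      simp
    · rw [pvGet2_cellApply_ne s _ _ (by
        by_cases h1 : i0 = i
        · right; intro h2; exact hcell ⟨h1.symm, h2⟩
        · left; exact h1) _]
      rw [ih m hm hi hj0 (Nat.le_of_succ_le hC)]
      by_cases h1 : i = i0 ∧ j0 < C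
      · rw [if_pos h1, if_pos ⟨h1.1, Nat.lt_succ_of_lt h1.2⟩]
      · rw [if_neg h1, if_neg (by
          rintro ⟨ha, hb⟩
          rcases Nat.lt_succ_iff_lt_or_eq.1 hb with hb' | hb'
          · exact h1 ⟨ha, hb'⟩
          · exact hcell ⟨ha, hb'⟩)]

theorem pvA_outer (s : List (List String)) (obory predmety : List String) (i0 j0 : Nat) :
    ∀ (R : Nat) (m : List (List Int)), pvShape obory.length predmety.length m →
      j0 < predmety.length → R ≤ obory.length →
      pvGet2
        ((List.range R).foldl
          (fun m i => (List.range predmety.length).foldl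
            (fun m j => pvCellApply s (obory.getD i "") (predmety.getD j "") i j m) m) m) i0 j0
        = if i0 < R then
            pvCellD s (obory.getD i0 "") (predmety.getD j0 "") (pvGet2 m i0 j0)
          else pvGet2 m i0 j0 := by
  intro R
  induction R with
  | zero => intro m hm hj0 hR; simp
  | succ R ih =>
    intro m hm hj0 hR
    rw [List.range_succ, List.foldl_append, List.foldl_cons, List.foldl_nil]
    have hX : pvShape obory.length predmety.length
        ((List.range R).foldl
          (fun m i => (List.range predmety.length).foldl
            (fun m j => pvCellApply s (obory.getD i "") (predmety.getD j "") i j m) m) m) :=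
      pvShape_foldl _
        (fun m i hm => pvShape_foldl _ (fun m j hm => pvShape_cellApply s _ _ i j hm) _ m hm)
        _ m hm
    rw [pvA_row s obory predmety R i0 j0 predmety.length _ hX (Nat.lt_of_succ_le hR) hj0 (Nat.le_refl _)]
    by_cases hi0 : i0 = R
    · subst hi0
      rw [if_pos ⟨rfl, hj0⟩, ih m hm hj0 (Nat.le_of_succ_le hR)]
      rw [if_neg (Nat.lt_irrefl i0), if_pos (Nat.lt_succ_self i0)]
    · rw [if_neg (by rintro ⟨h, -⟩; exact hi0 h.symm)]
      rw [ih m hm hj0 (Nat.le_of_succ_le hR)]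
      by_cases h1 : i0 < R
      · rw [if_pos h1, if_pos (Nat.lt_succ_of_lt h1)]
      · rw [if_neg h1, if_neg (by
          intro h2
          rcases Nat.lt_succ_iff_lt_or_eq.1 h2 with h' | h'
          · exact h1 h'
          · exact hi0 h')]

theorem pvA_eq_cellApply (seznam : List (List String)) (obory predmety : List String) :
    Vytvor_PPPDO seznam obory predmety
      = (List.range obory.length).foldl
          (fun m i => (List.range predmety.length).foldl
            (fun m j => pvCellApply seznam (obory.getD i "") (predmety.getD j "") i j m) m)
          (List.replicate obory.length (List.replicate predmety.length (0 : Int))) := by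
  unfold Vytvor_PPPDO
  rw [pvZero_A]
  apply PySem.List.foldl_congr_mem
  intro m i _
  apply PySem.List.foldl_congr_mem
  intro m j _
  rw [pvFoldl_range_getD
    (fun m r =>
      if obory.getD i "" == r.getD 0 "" then
        if predmety.getD j "" == r.getD 1 "" then
          pvSet2 m i j ((PySem.Int.ofStr? (r.getD 2 "")).getD 0)
        else m
      else m) [] seznam m]
  exact pvA_inner (obory.getD i "") (predmety.getD j "") i j seznam m

theorem pvA_char (seznam : List (List String)) (obory predmety : List String) (i0 j0 : Nat)
    (hi0 : i0 < obory.length) (hj0 : j0 < predmety.length) :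
    pvGet2 (Vytvor_PPPDO seznam obory predmety) i0 j0
      = pvCellD seznam (obory.getD i0 "") (predmety.getD j0 "") 0 := by
  rw [pvA_eq_cellApply]
  rw [pvA_outer seznam obory predmety i0 j0 obory.length _ (pvShape_zero _ _) hj0 (Nat.le_refl _)]
  rw [if_pos hi0, pvGet2_zero]

theorem pvA_shape (seznam : List (List String)) (obory predmety : List String) :
    pvShape obory.length predmety.length (Vytvor_PPPDO seznam obory predmety) := by
  rw [pvA_eq_cellApply]
  exact pvShape_foldl _
    (fun m i hm => pvShape_foldl _ (fun m j hm => pvShape_cellApply seznam _ _ i j hm) _ m hm)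
    _ _ (pvShape_zero _ _)

-- ===== B-side characterisation =====

theorem pvMem_idx (l : List String) (s : String) (i : Nat) :
    i ∈ (l.zipIdx.filter (fun oi => oi.1 == s)).map (fun oi => oi.2)
      ↔ i < l.length ∧ l.getD i "" = s := by
  constructor
  · intro h
    obtain ⟨⟨x, k⟩, hmem, hk⟩ := List.mem_map.1 h
    obtain ⟨hz, hx⟩ := List.mem_filter.1 hmem
    obtain ⟨-, hlt, he⟩ := List.mem_zipIdx hz
    simp only at hk
    subst hk
    have hlt' : k < l.length := by omega
    refine ⟨hlt', ?_⟩
    have hx' : x = s := by simpa using hx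
    rw [List.getD, List.getElem?_eq_getElem hlt']
    simp only [Option.getD_some]
    rw [← hx']
    simpa using he.symm
  · rintro ⟨hlt, he⟩
    apply List.mem_map.2
    refine ⟨(s, i), List.mem_filter.2 ⟨?_, by simp⟩, rfl⟩
    have : l[i] = s := by
      rw [List.getD, List.getElem?_eq_getElem hlt] at he
      simpa using he
    exact List.mem_zipIdx_iff_getElem?.2 (by simp [List.getElem?_eq_getElem hlt, this])

theorem pvB_write_row {R C : Nat} (v : Int) (i : Nat) (hi : i < R) (i0 j0 : Nat) :
    ∀ (jj : List Nat) (m : List (List Int)), pvShape R C m → j0 < C →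
      pvGet2 (jj.foldl (fun m j => pvSet2 m i j v) m) i0 j0
        = if i = i0 ∧ j0 ∈ jj then v else pvGet2 m i0 j0 := by
  intro jj
  induction jj with
  | nil => intro m hm hj0; simp
  | cons j jj ih =>
    intro m hm hj0
    rw [List.foldl_cons, ih _ (pvShape_set2 hm i j v) hj0]
    by_cases h1 : i = i0 ∧ j0 ∈ jj
    · rw [if_pos h1, if_pos ⟨h1.1, List.mem_cons_of_mem j h1.2⟩]
    · rw [if_neg h1]
      by_cases h2 : i = i0 ∧ j = j0
      · obtain ⟨rfl, rfl⟩ := h2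
        have hil : i < m.length := hm.1 ▸ hi
        have hjl : j < (m.getD i []).length := by
          rw [(pvGetD_mem hil).1, hm.2 _ (pvGetD_mem hil).2]; exact hj0
        rw [pvGet2_set2_self hil hjl v, if_pos ⟨rfl, List.mem_cons_self⟩]
      · rw [pvGet2_set2_ne (by
          by_cases ha : i0 = i
          · right; intro hb; exact h2 ⟨ha.symm, hb.symm⟩
          · left; exact ha) v]
        rw [if_neg (by
          rintro ⟨ha, hb⟩
          rcases List.mem_cons.1 hb with hb' | hb'
          · exact h2 ⟨ha, hb'.symm⟩
          · exact h1 ⟨ha, hb'⟩)]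

theorem pvB_write {R C : Nat} (v : Int) (jj : List Nat) (i0 j0 : Nat) :
    ∀ (ii : List Nat) (m : List (List Int)), pvShape R C m →
      (∀ i ∈ ii, i < R) → j0 < C →
      pvGet2 (ii.foldl (fun m i => jj.foldl (fun m j => pvSet2 m i j v) m) m) i0 j0
        = if i0 ∈ ii ∧ j0 ∈ jj then v else pvGet2 m i0 j0 := by
  intro ii
  induction ii with
  | nil => intro m hm hii hj0; simp
  | cons i ii ih =>
    intro m hm hii hj0
    have hshape : pvShape R C (jj.foldl (fun m j => pvSet2 m i j v) m) :=
      pvShape_foldl _ (fun m j hm => pvShape_set2 hm i j v) jj m hm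
    rw [List.foldl_cons, ih _ hshape (fun i hi => hii i (List.mem_cons_of_mem _ hi)) hj0]
    by_cases h1 : i0 ∈ ii ∧ j0 ∈ jj
    · rw [if_pos h1, if_pos ⟨List.mem_cons_of_mem i h1.1, h1.2⟩]
    · rw [if_neg h1,
        pvB_write_row v i (hii i List.mem_cons_self) i0 j0 jj m hm hj0]
      by_cases h2 : i = i0 ∧ j0 ∈ jj
      · rw [if_pos h2, if_pos ⟨h2.1 ▸ List.mem_cons_self, h2.2⟩]
      · rw [if_neg h2, if_neg (by
          rintro ⟨ha, hb⟩
          rcases List.mem_cons.1 ha with ha' | ha'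
          · exact h2 ⟨ha'.symm, hb⟩
          · exact h1 ⟨ha', hb⟩)]

theorem pvCellD_cons (r : List String) (s : List (List String)) (o p : String) (x : Int) :
    pvCellD (r :: s) o p x
      = if pvMatch o p r then pvCellD s o p (pvVal r) else pvCellD s o p x := by
  unfold pvCellD
  by_cases h : pvMatch o p r
  · rw [if_pos h, List.filter_cons_of_pos h]
    rcases s.filter (pvMatch o p) with - | ⟨a, l'⟩
    · simp
    · rw [List.getLast?_cons_cons]
      cases hgl : (a :: l').getLast? with
      | none => simp at hgl
      | some r' => rfl
  · rw [if_neg h, List.filter_cons_of_neg (by simpa using h)]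

-- B's per-record loop body (after the two emptiness guards collapse)
theorem pvB_step (obory predmety : List String) (r : List String) (i0 j0 : Nat)
    (hi0 : i0 < obory.length) (hj0 : j0 < predmety.length)
    (m : List (List Int)) (hm : pvShape obory.length predmety.length m) :
    pvGet2
      ((let ii := (obory.zipIdx.filter (fun oi => oi.1 == r.getD 0 "")).map (fun oi => oi.2)
        if ii = [] then m
        else
          let jj := (predmety.zipIdx.filter (fun pj => pj.1 == r.getD 1 "")).map (fun pj => pj.2)
          if jj = [] then m
          else
            let v := (PySem.Int.ofStr? (r.getD 2 "")).getD 0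
            ii.foldl (fun m i => jj.foldl (fun m j => pvSet2 m i j v) m) m)) i0 j0
      = if pvMatch (obory.getD i0 "") (predmety.getD j0 "") r then pvVal r
        else pvGet2 m i0 j0 := by
  set ii := (obory.zipIdx.filter (fun oi => oi.1 == r.getD 0 "")).map (fun oi => oi.2) with hii_def
  set jj := (predmety.zipIdx.filter (fun pj => pj.1 == r.getD 1 "")).map (fun pj => pj.2) with hjj_def
  have hmem_i : ∀ i, i ∈ ii ↔ i < obory.length ∧ obory.getD i "" = r.getD 0 "" := by
    intro i; rw [hii_def]; exact pvMem_idx obory (r.getD 0 "") i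
  have hmem_j : ∀ j, j ∈ jj ↔ j < predmety.length ∧ predmety.getD j "" = r.getD 1 "" := by
    intro j; rw [hjj_def]; exact pvMem_idx predmety (r.getD 1 "") j
  have hmatch : (pvMatch (obory.getD i0 "") (predmety.getD j0 "") r = true) ↔ (i0 ∈ ii ∧ j0 ∈ jj) := by
    unfold pvMatch
    rw [hmem_i, hmem_j]
    simp only [Bool.and_eq_true, beq_iff_eq]
    constructor
    · rintro ⟨h1, h2⟩; exact ⟨⟨hi0, h1⟩, ⟨hj0, h2⟩⟩
    · rintro ⟨⟨-, h1⟩, ⟨-, h2⟩⟩; exact ⟨h1, h2⟩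
  by_cases h1 : ii = []
  · simp only [h1, if_pos]
    rw [if_neg (by
      intro hmm
      exact List.not_mem_nil (a := i0) (h1 ▸ (hmatch.1 hmm).1))]
  · rw [if_neg h1]
    by_cases h2 : jj = []
    · simp only [h2, if_pos]
      rw [if_neg (by
        intro hmm
        exact List.not_mem_nil (a := j0) (h2 ▸ (hmatch.1 hmm).2))]
    · rw [if_neg h2]
      rw [pvB_write ((PySem.Int.ofStr? (r.getD 2 "")).getD 0) jj i0 j0 ii m hm
        (fun i hi => ((hmem_i i).1 hi).1) hj0]
      by_cases h3 : pvMatch (obory.getD i0 "") (predmety.getD j0 "") r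
      · rw [if_pos (hmatch.1 h3), if_pos h3]; rfl
      · rw [if_neg (fun hc => h3 (hmatch.2 hc)), if_neg h3]

theorem pvB_body_shape (obory predmety : List String) (r : List String)
    (m : List (List Int)) (hm : pvShape obory.length predmety.length m) :
    pvShape obory.length predmety.length
      ((let ii := (obory.zipIdx.filter (fun oi => oi.1 == r.getD 0 "")).map (fun oi => oi.2)
        if ii = [] then m
        else
          let jj := (predmety.zipIdx.filter (fun pj => pj.1 == r.getD 1 "")).map (fun pj => pj.2)
          if jj = [] then m
          else
            let v := (PySem.Int.ofStr? (r.getD 2 "")).getD 0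
            ii.foldl (fun m i => jj.foldl (fun m j => pvSet2 m i j v) m) m)) := by
  dsimp only
  split_ifs with h1 h2
  · exact hm
  · exact hm
  · exact pvShape_foldl _
      (fun m i hm => pvShape_foldl _ (fun m j hm => pvShape_set2 hm i j _) _ m hm) _ m hm

theorem pvB_fold (obory predmety : List String) (i0 j0 : Nat)
    (hi0 : i0 < obory.length) (hj0 : j0 < predmety.length) :
    ∀ (s : List (List String)) (m : List (List Int)), pvShape obory.length predmety.length m →
      pvGet2
        (s.foldl
          (fun m r =>
            let ii := (obory.zipIdx.filter (fun oi => oi.1 == r.getD 0 "")).map (fun oi => oi.2)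
            if ii = [] then m
            else
              let jj := (predmety.zipIdx.filter (fun pj => pj.1 == r.getD 1 "")).map (fun pj => pj.2)
              if jj = [] then m
              else
                let v := (PySem.Int.ofStr? (r.getD 2 "")).getD 0
                ii.foldl (fun m i => jj.foldl (fun m j => pvSet2 m i j v) m) m)
          m) i0 j0
        = pvCellD s (obory.getD i0 "") (predmety.getD j0 "") (pvGet2 m i0 j0) := by
  intro s
  induction s with
  | nil => intro m hm; rfl
  | cons r s ih =>
    intro m hm
    rw [List.foldl_cons, ih _ (pvB_body_shape obory predmety r m hm), pvCellD_cons]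
    rw [pvB_step obory predmety r i0 j0 hi0 hj0 m hm]
    by_cases h : pvMatch (obory.getD i0 "") (predmety.getD j0 "") r
    · rw [if_pos h, if_pos h]
    · rw [if_neg h, if_neg h]

theorem pvB_char (seznam : List (List String)) (obory predmety : List String) (i0 j0 : Nat)
    (hi0 : i0 < obory.length) (hj0 : j0 < predmety.length) :
    pvGet2 (Vytvor_PPPDO_alt seznam obory predmety) i0 j0
      = pvCellD seznam (obory.getD i0 "") (predmety.getD j0 "") 0 := by
  unfold Vytvor_PPPDO_alt
  rw [if_neg (by
    rintro (h | h)
    · rw [h] at hi0; simp at hi0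
    · rw [h] at hj0; simp at hj0)]
  rw [pvB_fold obory predmety i0 j0 hi0 hj0 seznam _ (pvZero_B obory predmety ▸ pvShape_zero _ _)]
  rw [pvZero_B, pvGet2_zero]

theorem pvB_shape (seznam : List (List String)) (obory predmety : List String) :
    pvShape obory.length predmety.length (Vytvor_PPPDO_alt seznam obory predmety) := by
  unfold Vytvor_PPPDO_alt
  by_cases h : obory = [] ∨ predmety = []
  · rw [if_pos h]
    exact pvZero_B obory predmety ▸ pvShape_zero _ _
  · rw [if_neg h]
    exact pvShape_foldl _ (fun m r hm => pvB_body_shape obory predmety r m hm) seznam _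
      (pvZero_B obory predmety ▸ pvShape_zero _ _)

-- ===== VERDICT (by name: the statement is the Claim_ definition above) =====
theorem Vytvor_PPPDO_spec : Claim_equal_Vytvor_PPPDO := by
  intro seznam obory predmety _ _
  unfold Spec_Vytvor_PPPDO
  exact pvMatrix_ext (pvA_shape seznam obory predmety) (pvB_shape seznam obory predmety)
    (fun i hi j hj => by
      rw [pvA_char seznam obory predmety i j hi hj, pvB_char seznam obory predmety i j hi hj])
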